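-- pv_equiv track=rewrite | github.com/petevmv/python_101 | Concept1_python_basics/week1/Iban_formater/iban_formater.py | iban_formater
-- ===== SOURCE A (Python) =====
-- def iban_formater(iban):
--     result = []
--     iban = iban.replace(' ', '')
--     for idx, num in enumerate(iban):
--         if (idx) % 4 == 0:
--             result.append(' ')
--
--         result.append(num)
--     return ''.join(result).lstrip()
-- ===== SOURCE B (Python) =====
-- def iban_formater(iban):
--     s = iban.replace(' ', '')
--     return ' '.join(s[i:i+4] for i in range(0, len(s), 4))
-- ===== Notes on version B (the rewrite author's own statement) =====
-- stated objective: idiomatic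
-- what changed: A walks the cleaned string character by character, prepending a sentinel space before every index divisible by 4 and finally lstrip-ping it away; B slices the cleaned string into 4-character chunks and joins them with single spaces, with no sentinel and no lstrip.
-- intended difference: On inputs whose space-stripped text begins with a tab, newline or CR, A's trailing lstrip (an artefact of its prepend-space-then-strip mechanism) also removes that leading whitespace, while B keeps it; the formatter is only meant to regroup characters with spaces, so B's value is the intended one. — e.g. on iban_formater("\tAB"): A returns "AB", B returns "\tAB"
import Mathlib
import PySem

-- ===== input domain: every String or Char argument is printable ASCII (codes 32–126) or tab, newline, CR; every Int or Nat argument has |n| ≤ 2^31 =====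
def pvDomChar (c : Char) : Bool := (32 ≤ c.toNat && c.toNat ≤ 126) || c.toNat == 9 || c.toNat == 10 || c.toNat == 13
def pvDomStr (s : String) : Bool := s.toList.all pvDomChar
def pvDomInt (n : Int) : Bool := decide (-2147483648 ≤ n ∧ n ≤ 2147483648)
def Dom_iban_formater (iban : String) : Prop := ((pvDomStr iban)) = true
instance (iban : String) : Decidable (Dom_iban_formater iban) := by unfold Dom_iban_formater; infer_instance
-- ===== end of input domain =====

-- B replaces A's per-character walk (sentinel space before every 4th index, then lstrip)
-- by slicing the cleaned string into 4-char chunks joined with spaces; on inputs whose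
-- cleaned text starts with tab/newline/CR the two differ (see D_ below).


-- ===== PORT A =====
-- result is the list of appended one-char strings; ''.join(result) = String.ofList result
def iban_formater (iban : String) : String :=
  let iban2 := PySem.Str.replace iban " " ""
  let result : List Char :=
    (PySem.List.enumerate iban2.toList 0).foldl
      (fun r p => (if PySem.Int.mod p.1 4 == 0 then r ++ [' '] else r) ++ [p.2]) []
  PySem.Str.lstrip (String.ofList result)

-- ===== PORT B =====
def iban_formater_alt (iban : String) : String :=
  let s := PySem.Str.replace iban " " ""
  PySem.Str.join " "
    ((PySem.List.pyRange 0 (PySem.Str.len s) 4).map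
      (fun i => PySem.Str.slice s (some i) (some (i + 4))))

-- ===== PRECONDITION & SPEC =====
-- On inputs whose space-stripped text begins with a tab, newline or CR, A's trailing lstrip
-- (an artefact of its prepend-space-then-strip mechanism) also removes that leading whitespace,
-- while B keeps it; the formatter only regroups characters with spaces, so B's value is intended.
def D_iban_formater (iban : String) : Prop :=
  PySem.Chars.isspace ((iban.toList.filter (fun c => c ≠ ' ')).headD 'x') = true
instance (iban : String) : Decidable (D_iban_formater iban) := by unfold D_iban_formater; infer_instance

def Spec_iban_formater (iban : String) (out : String) : Prop :=
  ¬ D_iban_formater iban → out = iban_formater_alt iban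
instance (iban : String) (out : String) : Decidable (Spec_iban_formater iban out) := by
  unfold Spec_iban_formater; infer_instance

def pvDiffWitness_iban_formater : String := "\tAB"
def pvDiffWitnessOut_iban_formater : String × String := ("AB", "\tAB")

-- ===== CLAIM (what is proved, stated in full; the proofs are below) =====
def Claim_unchanged_iban_formater : Prop :=
  ∀ (iban : String), Dom_iban_formater iban → Spec_iban_formater iban (iban_formater iban)
def Claim_changed_iban_formater : Prop :=
  Dom_iban_formater (pvDiffWitness_iban_formater) ∧ D_iban_formater (pvDiffWitness_iban_formater) ∧
  iban_formater (pvDiffWitness_iban_formater) = pvDiffWitnessOut_iban_formater.1 ∧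
  iban_formater_alt (pvDiffWitness_iban_formater) = pvDiffWitnessOut_iban_formater.2 ∧
  pvDiffWitnessOut_iban_formater.1 ≠ pvDiffWitnessOut_iban_formater.2
def Claim_exact_iban_formater : Prop :=
  ∀ (iban : String), Dom_iban_formater iban → D_iban_formater iban →
    iban_formater iban ≠ iban_formater_alt iban

-- the 4-char chunks of a list (proof helper)
def pvChunks (cs : List Char) : List (List Char) :=
  match cs with
  | [] => []
  | c :: t => ((c :: t).take 4) :: pvChunks ((c :: t).drop 4)
termination_by cs.length
decreasing_by simp

-- ===== LEMMAS AND PROOFS =====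

-- the cleaned string, as a list: replacing ' ' by '' is filtering out spaces
theorem pvReplaceGo_filter (fuel : Nat) (l acc : List Char) (h : l.length ≤ fuel) :
    PySem.Chars.replace.go [' '] [] fuel l acc
      = acc.reverse ++ l.filter (fun c => c ≠ ' ') := by
  induction fuel generalizing l acc with
  | zero =>
    have : l = [] := by cases l <;> simp_all
    subst this; simp [PySem.Chars.replace.go]
  | succ fuel ih =>
    cases l with
    | nil => simp [PySem.Chars.replace.go]
    | cons c t =>
      rw [PySem.Chars.replace.go]
      by_cases hc : c = ' '
      · subst hc
        simp only [List.isPrefixOf, BEq.rfl, Bool.true_and, if_pos]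
        rw [ih _ _ (by simpa using Nat.le_of_succ_le_succ h)]
        simp
      · have hp : ([' '].isPrefixOf (c :: t)) = false := by
          simp [List.isPrefixOf]; exact fun h' => hc h'.symm
        rw [if_neg (by simp [hp])]
        rw [ih _ _ (by simpa using Nat.le_of_succ_le_succ h)]
        simp [hc]

theorem pvReplace_filter (l : List Char) :
    PySem.Chars.replace l [' '] [] = l.filter (fun c => c ≠ ' ') := by
  rw [PySem.Chars.replace]
  simp [pvReplaceGo_filter l.length l [] (le_refl _)]

-- B side: the slice/range pass produces exactly the chunks
theorem pvRangeChunks (n : Nat) (cs : List Char) (h : cs.length ≤ n) :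
    (List.range ((cs.length + 3) / 4)).map (fun k => (cs.drop (4 * k)).take 4)
      = pvChunks cs := by
  induction n generalizing cs with
  | zero =>
    have : cs = [] := by cases cs <;> simp_all
    subst this; simp [pvChunks]
  | succ n ih =>
    cases cs with
    | nil => simp [pvChunks]
    | cons c t =>
      have hm : ((c :: t).length + 3) / 4 = (((c :: t).drop 4).length + 3) / 4 + 1 := by
        simp; omega
      rw [hm, List.range_succ_eq_map, List.map_cons, List.map_map, pvChunks]
      rw [← ih ((c :: t).drop 4) (by simp at h ⊢; omega)]
      congr 1
      apply List.map_congr_left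
      intro k _
      show List.take 4 (List.drop (4 * (k+1)) (c :: t)) = List.take 4 (List.drop (4 * k) (List.drop 4 (c :: t)))
      rw [List.drop_drop]
      congr 2
      omega

-- A side: the enumerate/fold pass prepends a space before every chunk
theorem pvFoldChunks (n : Nat) (cs : List Char) (h : cs.length ≤ n) (s : Int) (r : List Char)
    (hs : s % 4 = 0) :
    (PySem.List.enumerate cs s).foldl
        (fun r p => (if PySem.Int.mod p.1 4 == 0 then r ++ [' '] else r) ++ [p.2]) r
      = r ++ (pvChunks cs).flatMap (fun ch => ' ' :: ch) := by
  induction n generalizing cs s r with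
  | zero =>
    have : cs = [] := by cases cs <;> simp_all
    subst this; simp [pvChunks, PySem.List.enumerate]
  | succ n ih =>
    have h0 : (PySem.Int.mod s 4 == 0) = true := by
      rw [PySem.Int.mod_eq_emod_of_pos (by norm_num)]; simp [hs]
    have h1 : (PySem.Int.mod (s + 1) 4 == 0) = false := by
      rw [PySem.Int.mod_eq_emod_of_pos (by norm_num)]; simp; omega
    have h2 : (PySem.Int.mod (s + 1 + 1) 4 == 0) = false := by
      rw [PySem.Int.mod_eq_emod_of_pos (by norm_num)]; simp; omega
    have h3 : (PySem.Int.mod (s + 1 + 1 + 1) 4 == 0) = false := by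
      rw [PySem.Int.mod_eq_emod_of_pos (by norm_num)]; simp; omega
    have hd0 : (4:Int) ∣ s := Int.dvd_of_emod_eq_zero hs
    have hd1 : ¬ (4:Int) ∣ (s+1) := by omega
    have hd2 : ¬ (4:Int) ∣ (s+1+1) := by omega
    match cs with
    | [] => simp [pvChunks, PySem.List.enumerate]
    | [a] =>
      simp [pvChunks, PySem.List.enumerate_cons, PySem.List.enumerate_nil, hd0]
    | [a, b] =>
      simp [pvChunks, PySem.List.enumerate_cons, PySem.List.enumerate_nil, hd0, hd1]
    | [a, b, c] =>
      simp [pvChunks, PySem.List.enumerate_cons, PySem.List.enumerate_nil, hd0, hd1, hd2]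
    | a :: b :: c :: d :: t =>
      rw [PySem.List.enumerate_cons, PySem.List.enumerate_cons, PySem.List.enumerate_cons,
          PySem.List.enumerate_cons]
      simp only [List.foldl_cons, h0, h1, h2, h3, if_pos, Bool.false_eq_true, if_false]
      rw [ih t (by simp at h; omega) (s + 1 + 1 + 1 + 1)
          (r ++ [' '] ++ [a] ++ [b] ++ [c] ++ [d]) (by omega)]
      rw [pvChunks]
      simp

theorem pvFlatJoin (ch : List Char) (chs : List (List Char)) :
    (ch :: chs).flatMap (fun ch => ' ' :: ch) = ' ' :: PySem.Chars.join [' '] (ch :: chs) := by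
  induction chs generalizing ch with
  | nil => simp [PySem.Chars.join_singleton]
  | cons ch2 chs ih =>
    rw [List.flatMap_cons, ih ch2, PySem.Chars.join_cons_cons]
    simp

-- both ports, computed down to pvChunks of the cleaned character list
theorem pvToListReplace (iban : String) :
    (PySem.Str.replace iban " " "").toList = iban.toList.filter (fun c => c ≠ ' ') := by
  have h1 : (" " : String).toList = [' '] := by decide
  have h2 : ("" : String).toList = [] := by decide
  rw [PySem.Str.toList_replace, h1, h2, pvReplace_filter]

theorem pvAlist (iban : String) :
    (iban_formater iban).toList
      = PySem.Chars.lstrip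
          ((pvChunks (iban.toList.filter (fun c => c ≠ ' '))).flatMap (fun ch => ' ' :: ch)) := by
  rw [iban_formater]
  rw [PySem.Str.toList_lstrip, String.toList_ofList, pvToListReplace]
  rw [pvFoldChunks (iban.toList.filter (fun c => c ≠ ' ')).length _ le_rfl 0 [] (by decide)]
  simp

theorem pvBlist (iban : String) :
    (iban_formater_alt iban).toList
      = PySem.Chars.join [' '] (pvChunks (iban.toList.filter (fun c => c ≠ ' '))) := by
  simp only [iban_formater_alt]
  rw [PySem.Str.toList_join]
  have hsep : (" " : String).toList = [' '] := by decide
  rw [hsep]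
  refine congrArg _ ?_
  rw [List.map_map]
  have hlen : PySem.Str.len (PySem.Str.replace iban " " "")
      = ((iban.toList.filter (fun c => c ≠ ' ')).length : Int) := by
    rw [PySem.Str.len, pvToListReplace]
  rw [hlen, PySem.List.pyRange_of_pos 0 _ (by norm_num)]
  have hcount : (if (0:Int) < ((iban.toList.filter (fun c => c ≠ ' ')).length : Int)
        then ((((iban.toList.filter (fun c => c ≠ ' ')).length : Int) - 0 + 4 - 1) / 4).toNat
        else 0)
      = ((iban.toList.filter (fun c => c ≠ ' ')).length + 3) / 4 := by
    split_ifs with h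
    · omega
    · omega
  rw [hcount, List.map_map]
  rw [← pvRangeChunks (iban.toList.filter (fun c => c ≠ ' ')).length _ le_rfl]
  apply List.map_congr_left
  intro k _
  show String.toList (PySem.Str.slice (PySem.Str.replace iban " " "")
        (some (0 + 4 * (k:Int))) (some (0 + 4 * (k:Int) + 4)))
      = List.take 4 (List.drop (4 * k) (iban.toList.filter (fun c => c ≠ ' ')))
  rw [PySem.Str.toList_slice, pvToListReplace, PySem.Chars.slice_eq_listSlice]
  have ha : (0 + 4 * (k:Int)) = ((4 * k : Nat) : Int) := by push_cast; ring
  rw [ha]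
  have hb : (((4 * k : Nat) : Int) + 4) = ((4 * k + 4 : Nat) : Int) := by push_cast; ring
  rw [hb, PySem.List.slice_natCast]
  congr 1
  omega

-- ===== VERDICT (by name: the statement is the Claim_ definition above) =====
theorem iban_formater_spec : Claim_unchanged_iban_formater := by
  intro iban _ hnd
  apply String.toList_inj.mp
  rw [pvAlist, pvBlist]
  rcases hcs : iban.toList.filter (fun c => c ≠ ' ') with _ | ⟨c, t⟩
  · simp [pvChunks, PySem.Chars.lstrip]
  · have hc : PySem.Chars.isspace c = false := by
      unfold D_iban_formater at hnd
      rw [hcs] at hnd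
      simpa using hnd
    rw [pvChunks, pvFlatJoin, PySem.Chars.lstrip]
    rw [List.dropWhile_cons, if_pos (by decide)]
    rcases pvChunks ((c :: t).drop 4) with _ | ⟨ch2, chs⟩
    · rw [PySem.Chars.join_singleton]
      simp [hc]
    · rw [PySem.Chars.join_cons_cons]
      simp [hc]

theorem iban_formater_changed : Claim_changed_iban_formater := by
  unfold Claim_changed_iban_formater; decide

theorem iban_formater_tight : Claim_exact_iban_formater := by
  intro iban _ hd heq
  have h := congrArg String.toList heq
  rw [pvAlist, pvBlist] at h
  unfold D_iban_formater at hd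
  rcases hcs : iban.toList.filter (fun c => c ≠ ' ') with _ | ⟨c, t⟩
  · rw [hcs] at hd
    exact absurd hd (by decide)
  · have hc : PySem.Chars.isspace c = true := by rw [hcs] at hd; simpa using hd
    rw [hcs, pvChunks, pvFlatJoin, PySem.Chars.lstrip] at h
    rw [List.dropWhile_cons, if_pos (by decide)] at h
    rcases hch : pvChunks ((c :: t).drop 4) with _ | ⟨ch2, chs⟩
    · rw [hch, PySem.Chars.join_singleton] at h
      rw [List.take_succ_cons, List.dropWhile_cons, if_pos hc] at h
      have := congrArg List.length h
      have hle := List.length_dropWhile_le PySem.Chars.isspace (t.take 3)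
      simp at this hle
      omega
    · rw [hch, PySem.Chars.join_cons_cons] at h
      rw [List.take_succ_cons] at h
      rw [List.cons_append, List.cons_append, List.dropWhile_cons, if_pos hc] at h
      have := congrArg List.length h
      have hle := List.length_dropWhile_le PySem.Chars.isspace ((t.take 3 ++ [' ']) ++ PySem.Chars.join [' '] (ch2 :: chs))
      simp at this hle
      omega
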